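-- pv_equiv track=rewrite | github.com/Lulisderoo20/agenda | scripts/generate_daily_verses.py | candidate_verses
-- ===== SOURCE A (Python) =====
-- FALLBACK_VERSES = tuple(range(1, 13))
--
-- def candidate_verses(preferred: int) -> list[int]:
--     candidates = []
--     seen = set()
--
--     for verse in (preferred, *FALLBACK_VERSES):
--         if verse in seen:
--             continue
--         seen.add(verse)
--         candidates.append(verse)
--
--     return candidates
-- ===== SOURCE B (Python) =====
-- def candidate_verses(preferred: int) -> list[int]:
--     # Piecewise arithmetic construction: no scan, no dedup. The fallback verses
--     # are exactly range(1, 13); if preferred lies inside that range, the verses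
--     # other than preferred form two contiguous runs around it.
--     if 1 <= preferred <= 12:
--         return [preferred, *range(1, preferred), *range(preferred + 1, 13)]
--     return [preferred, *range(1, 13)]
-- ===== Notes on version B (the rewrite author's own statement) =====
-- stated objective: alternative
-- what changed: Replaces A's seen-set dedup scan over the candidate tuple by a branch on whether preferred lies in 1..12 and a direct arithmetic construction of the result from two ranges around preferred (or the full range), with no scan, no filter and no set.
import Mathlib
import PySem

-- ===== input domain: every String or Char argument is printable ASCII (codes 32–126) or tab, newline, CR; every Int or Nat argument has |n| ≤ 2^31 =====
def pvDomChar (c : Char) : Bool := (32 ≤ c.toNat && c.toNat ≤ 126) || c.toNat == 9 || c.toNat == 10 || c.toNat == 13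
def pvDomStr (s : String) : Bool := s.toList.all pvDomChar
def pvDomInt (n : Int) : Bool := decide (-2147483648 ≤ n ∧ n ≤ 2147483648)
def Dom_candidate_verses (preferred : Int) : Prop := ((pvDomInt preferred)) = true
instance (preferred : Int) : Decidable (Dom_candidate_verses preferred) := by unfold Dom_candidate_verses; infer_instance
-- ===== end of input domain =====

-- B replaces A's seen-set dedup scan by a branch on 1 ≤ preferred ≤ 12 and a direct construction from two ranges around preferred; objective: alternative.


-- ===== PORT A =====
-- FALLBACK_VERSES = tuple(range(1, 13))
def FALLBACK_VERSES : List Int := PySem.List.pyRange 1 13 1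

def candidate_verses (preferred : Int) : List Int :=
  ((preferred :: FALLBACK_VERSES).foldl
    (fun (st : List Int × PySem.Set Int) verse =>
      if PySem.Set.contains st.2 verse then st
      else (st.1 ++ [verse], PySem.Set.add st.2 verse))
    ([], PySem.Set.empty)).1

-- ===== PORT B =====
def candidate_verses_alt (preferred : Int) : List Int :=
  if 1 ≤ preferred ∧ preferred ≤ 12 then
    preferred :: (PySem.List.pyRange 1 preferred 1 ++ PySem.List.pyRange (preferred + 1) 13 1)
  else
    preferred :: PySem.List.pyRange 1 13 1

-- ===== PRECONDITION & SPEC =====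
def Spec_candidate_verses (preferred : Int) (out : List Int) : Prop := out = candidate_verses_alt preferred
instance (preferred : Int) (out : List Int) : Decidable (Spec_candidate_verses preferred out) := by unfold Spec_candidate_verses; infer_instance

-- ===== CLAIM (what is proved, stated in full; the proofs are below) =====
def Claim_equal_candidate_verses : Prop := ∀ (preferred : Int), Dom_candidate_verses preferred → Spec_candidate_verses preferred (candidate_verses preferred)

-- ===== LEMMAS AND PROOFS =====

-- A's dedup fold over a duplicate-free list, with matching list/set state,
-- appends exactly the elements not already in the state.
theorem fold_dedup (l : List Int) (acc : List Int) (hnd : l.Nodup) :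
    (l.foldl
      (fun (st : List Int × PySem.Set Int) verse =>
        if PySem.Set.contains st.2 verse then st
        else (st.1 ++ [verse], PySem.Set.add st.2 verse))
      (acc, acc))
    = (acc ++ l.filter (fun v => decide (v ∉ acc)),
       acc ++ l.filter (fun v => decide (v ∉ acc))) := by
  induction l generalizing acc with
  | nil => simp
  | cons v t ih =>
    have hnd' := List.nodup_cons.mp hnd
    by_cases hv : v ∈ acc
    · simp only [List.foldl_cons]
      rw [if_pos (by simp [PySem.Set.contains, hv])]
      rw [ih acc hnd'.2]
      simp [hv]
    · simp only [List.foldl_cons]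
      rw [if_neg (by simp [PySem.Set.contains, hv])]
      rw [PySem.Set.add_of_not_mem hv, ih (acc ++ [v]) hnd'.2]
      have hfc : t.filter (fun x => decide (x ∉ acc ++ [v]))
               = t.filter (fun x => decide (x ∉ acc)) :=
        List.filter_congr (fun x hx => by
          have hxv : x ≠ v := fun h => hnd'.1 (h ▸ hx)
          simp [hxv])
      rw [hfc]
      simp [hv, List.append_assoc]

-- A's result in closed form: preferred followed by the fallbacks other than preferred.
theorem candidate_verses_closed (p : Int) :
    candidate_verses p = p :: FALLBACK_VERSES.filter (fun v => decide (v ∉ [p])) := by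
  unfold candidate_verses
  have hnd : FALLBACK_VERSES.Nodup := by
    unfold FALLBACK_VERSES; exact PySem.List.nodup_pyRange_one 1 13
  simp only [List.foldl_cons]
  rw [if_neg (by simp [PySem.Set.contains, PySem.Set.empty])]
  rw [show PySem.Set.add (PySem.Set.empty : PySem.Set Int) p = [p] from
    PySem.Set.add_of_not_mem (by simp [PySem.Set.empty])]
  simp only [List.nil_append]
  rw [fold_dedup FALLBACK_VERSES [p] hnd]
  rfl

theorem candidate_verses_eq (p : Int) : candidate_verses p = candidate_verses_alt p := by
  rw [candidate_verses_closed]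
  unfold candidate_verses_alt
  by_cases h : 1 ≤ p ∧ p ≤ 12
  · rw [if_pos h]
    obtain ⟨h1, h2⟩ := h
    interval_cases p <;> decide
  · rw [if_neg h]
    congr 1
    have hF : FALLBACK_VERSES = [1, 2, 3, 4, 5, 6, 7, 8, 9, 10, 11, 12] := by decide
    rw [hF]
    have hb : p < 1 ∨ 12 < p := by omega
    apply List.filter_eq_self.mpr
    intro v hv
    fin_cases hv <;> simp <;> omega

-- ===== VERDICT (by name: the statement is the Claim_ definition above) =====
theorem candidate_verses_spec : Claim_equal_candidate_verses := by
  intro p _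
  exact candidate_verses_eq p
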